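-- pv_equiv track=rewrite | github.com/nitinog10/Team-GitForge-AI-for-bharat | backend/app/api/endpoints/files.py | _escape_mermaid_label
-- ===== SOURCE A (Python) =====
-- def _escape_mermaid_label(text: str) -> str:
--     """Escape characters that break Mermaid flowchart label syntax."""
--     text = text.replace("\\", "/")            # backslash → forward slash
--     text = text.replace('"', "'")             # double quote
--     # Use Unicode escapes to avoid interfering with Mermaid syntax
--     for ch, repl in [
--         ("(", "❨"), (")", "❩"),   # parentheses → fullwidth
--         ("[", "⟦"), ("]", "⟧"),   # square brackets
--         ("{", "❴"), ("}", "❵"),   # curly braces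
--         ("|", "│"),               # pipe
--         ("#", "﹟"),              # hash
--         ("<", "‹"), (">", "›"),   # angle brackets
--     ]:
--         text = text.replace(ch, repl)
--     return text
-- ===== SOURCE B (Python) =====
-- _MERMAID_TABLE = str.maketrans({
--     "\\": "/", '"': "'",
--     "(": "\u2768", ")": "\u2769",
--     "[": "\u27e6", "]": "\u27e7",
--     "{": "\u2774", "}": "\u2775",
--     "|": "\u2502", "#": "\ufe5f",
--     "<": "\u2039", ">": "\u203a",
-- })
--
--
-- def _escape_mermaid_label(text: str) -> str:
--     """Escape characters that break Mermaid flowchart label syntax."""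
--     return text.translate(_MERMAID_TABLE)
-- ===== Notes on version B (the rewrite author's own statement) =====
-- stated objective: idiomatic
-- what changed: Replaces twelve sequential whole-string str.replace scans with one precomputed str.maketrans translation table applied in a single text.translate pass.
import Mathlib
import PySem

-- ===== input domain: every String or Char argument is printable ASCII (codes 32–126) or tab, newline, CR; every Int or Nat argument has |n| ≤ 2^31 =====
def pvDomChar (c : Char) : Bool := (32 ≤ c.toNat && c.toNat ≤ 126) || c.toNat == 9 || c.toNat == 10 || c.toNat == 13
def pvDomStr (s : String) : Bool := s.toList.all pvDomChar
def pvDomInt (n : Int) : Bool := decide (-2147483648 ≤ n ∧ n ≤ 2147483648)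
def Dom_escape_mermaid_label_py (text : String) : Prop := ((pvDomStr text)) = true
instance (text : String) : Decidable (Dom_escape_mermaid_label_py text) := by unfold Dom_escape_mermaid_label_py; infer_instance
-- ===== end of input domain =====

-- B replaces A's twelve sequential whole-string replace passes by one precomputed
-- character-translation table applied in a single pass (idiomatic str.maketrans/translate).

-- ===== PORT A =====
def escape_mermaid_label_py (text : String) : String :=
  let text := PySem.Str.replace text "\\" "/"
  let text := PySem.Str.replace text "\"" "'"
  (([("(", "❨"), (")", "❩"),
     ("[", "⟦"), ("]", "⟧"),
     ("{", "❴"), ("}", "❵"),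
     ("|", "│"),
     ("#", "﹟"),
     ("<", "‹"), (">", "›")] : List (String × String)).foldl
    (fun text p => PySem.Str.replace text p.1 p.2) text)

-- ===== PORT B =====
-- str.maketrans table: one (source char → replacement char) entry per pair
def pvMermaidTable : List (Char × Char) :=
  [('\\', '/'), ('"', '\''),
   ('(', '❨'), (')', '❩'),
   ('[', '⟦'), (']', '⟧'),
   ('{', '❴'), ('}', '❵'),
   ('|', '│'), ('#', '﹟'),
   ('<', '‹'), ('>', '›')]

-- text.translate(table): single pass, table lookup per character (identity when absent)
def escape_mermaid_label_py_alt (text : String) : String :=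
  String.ofList (text.toList.map (fun c => ((pvMermaidTable.lookup c).getD c)))

-- ===== PRECONDITION & SPEC =====
def Spec_escape_mermaid_label_py (text : String) (out : String) : Prop := out = escape_mermaid_label_py_alt text
instance (text : String) (out : String) : Decidable (Spec_escape_mermaid_label_py text out) := by unfold Spec_escape_mermaid_label_py; infer_instance

-- ===== CLAIM (what is proved, stated in full; the proofs are below) =====
def Claim_equal_escape_mermaid_label_py : Prop := ∀ (text : String), Dom_escape_mermaid_label_py text → Spec_escape_mermaid_label_py text (escape_mermaid_label_py text)

-- ===== LEMMAS AND PROOFS =====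

-- replace.go for a single-character pattern is a pointwise map
lemma pv_go_single (c d : Char) : ∀ (fuel : Nat) (l acc : List Char), l.length ≤ fuel →
    PySem.Chars.replace.go [c] [d] fuel l acc
      = acc.reverse ++ l.map (fun x => if x = c then d else x) := by
  intro fuel
  induction fuel with
  | zero =>
    intro l acc h
    have : l = [] := by cases l <;> simp_all
    subst this
    simp [PySem.Chars.replace.go]
  | succ n ih =>
    intro l acc h
    cases l with
    | nil => simp [PySem.Chars.replace.go]
    | cons x t =>
      rw [PySem.Chars.replace.go]
      by_cases hx : x = c
      · subst hx
        simp only [List.isPrefixOf, beq_self_eq_true, Bool.true_and, if_true]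
        rw [ih _ _ (by simpa using Nat.le_of_succ_le_succ h)]
        simp
      · have : [c].isPrefixOf (x :: t) = false := by
          simp [List.isPrefixOf]; exact fun h' => absurd h'.symm hx
        rw [this]
        simp only [Bool.false_eq_true, if_false]
        rw [ih _ _ (by simpa using Nat.le_of_succ_le_succ h)]
        simp [hx]

-- single-char/single-char replace is List.map of a conditional swap
lemma pv_replace_single (s : List Char) (c d : Char) :
    PySem.Chars.replace s [c] [d] = s.map (fun x => if x = c then d else x) := by
  rw [PySem.Chars.replace]
  simp [pv_go_single c d s.length s [] (le_refl _)]

-- the twelve sequential conditional swaps agree pointwise with one table lookup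
lemma pv_pointwise (x : Char) :
    (fun x => if x = '>' then '›' else x)
      ((fun x => if x = '<' then '‹' else x)
        ((fun x => if x = '#' then '﹟' else x)
          ((fun x => if x = '|' then '│' else x)
            ((fun x => if x = '}' then '❵' else x)
              ((fun x => if x = '{' then '❴' else x)
                ((fun x => if x = ']' then '⟧' else x)
                  ((fun x => if x = '[' then '⟦' else x)
                    ((fun x => if x = ')' then '❩' else x)
                      ((fun x => if x = '(' then '❨' else x)
                        ((fun x => if x = '"' then '\'' else x)
                          ((fun x => if x = '\\' then '/' else x) x)))))))))))
      = (pvMermaidTable.lookup x).getD x := by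
  by_cases h1 : x = '\\'; · subst h1; decide
  by_cases h2 : x = '"'; · subst h2; decide
  by_cases h3 : x = '('; · subst h3; decide
  by_cases h4 : x = ')'; · subst h4; decide
  by_cases h5 : x = '['; · subst h5; decide
  by_cases h6 : x = ']'; · subst h6; decide
  by_cases h7 : x = '{'; · subst h7; decide
  by_cases h8 : x = '}'; · subst h8; decide
  by_cases h9 : x = '|'; · subst h9; decide
  by_cases h10 : x = '#'; · subst h10; decide
  by_cases h11 : x = '<'; · subst h11; decide
  by_cases h12 : x = '>'; · subst h12; decide
  have e1 : (x == '\\') = false := by simp [h1]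
  have e2 : (x == '"') = false := by simp [h2]
  have e3 : (x == '(') = false := by simp [h3]
  have e4 : (x == ')') = false := by simp [h4]
  have e5 : (x == '[') = false := by simp [h5]
  have e6 : (x == ']') = false := by simp [h6]
  have e7 : (x == '{') = false := by simp [h7]
  have e8 : (x == '}') = false := by simp [h8]
  have e9 : (x == '|') = false := by simp [h9]
  have e10 : (x == '#') = false := by simp [h10]
  have e11 : (x == '<') = false := by simp [h11]
  have e12 : (x == '>') = false := by simp [h12]
  simp [pvMermaidTable, List.lookup, h1, h2, h3, h4, h5, h6, h7, h8, h9, h10, h11, h12,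
        e1, e2, e3, e4, e5, e6, e7, e8, e9, e10, e11, e12]

-- ===== VERDICT (by name: the statement is the Claim_ definition above) =====
theorem escape_mermaid_label_py_spec : Claim_equal_escape_mermaid_label_py := by
  intro text _
  unfold Spec_escape_mermaid_label_py escape_mermaid_label_py escape_mermaid_label_py_alt
  simp only [List.foldl]
  apply String.toList_inj.mp
  simp only [PySem.Str.toList_replace, String.toList_ofList,
    show ("\\" : String).toList = ['\\'] from rfl,
    show ("/" : String).toList = ['/'] from rfl,
    show ("\"" : String).toList = ['"'] from rfl,
    show ("'" : String).toList = ['\''] from rfl,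
    show ("(" : String).toList = ['('] from rfl,
    show ("❨" : String).toList = ['❨'] from rfl,
    show (")" : String).toList = [')'] from rfl,
    show ("❩" : String).toList = ['❩'] from rfl,
    show ("[" : String).toList = ['['] from rfl,
    show ("⟦" : String).toList = ['⟦'] from rfl,
    show ("]" : String).toList = [']'] from rfl,
    show ("⟧" : String).toList = ['⟧'] from rfl,
    show ("{" : String).toList = ['{'] from rfl,
    show ("❴" : String).toList = ['❴'] from rfl,
    show ("}" : String).toList = ['}'] from rfl,
    show ("❵" : String).toList = ['❵'] from rfl,
    show ("|" : String).toList = ['|'] from rfl,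
    show ("│" : String).toList = ['│'] from rfl,
    show ("#" : String).toList = ['#'] from rfl,
    show ("﹟" : String).toList = ['﹟'] from rfl,
    show ("<" : String).toList = ['<'] from rfl,
    show ("‹" : String).toList = ['‹'] from rfl,
    show (">" : String).toList = ['>'] from rfl,
    show ("›" : String).toList = ['›'] from rfl]
  simp only [pv_replace_single]
  simp only [List.map_map, Function.comp_def]
  exact List.map_congr_left (fun x _ => pv_pointwise x)
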